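-- pv_equiv track=rewrite | github.com/josiahmugambi/data-structures-algorithms | 1_algorithmic-toolbox/week5-6_dynamic-programming/6-2_partitioning_sourvenirs/partition_souvenirs.py | subset3_sum
-- ===== SOURCE A (Python) =====
-- def subset3_sum(subset, n, s1, s2, s3):
--
--     # 3 empty sub-sets means that they are equal
--     if s1 == 0 and s2 == 0 and s3 == 0:
--         return 1
--
--     # base case
--     if n < 0:
--         return 0
--
--     # becomes part of subset 1
--     in_s1 = 0
--     if s1 - subset[n] >= 0:
--         in_s1 = subset3_sum(subset, n - 1, s1 - subset[n], s2, s3)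
--
--     # becomes part of subset 2
--     in_s2 = 0
--     if not in_s1 and (s2 - subset[n] >= 0):
--         in_s2 = subset3_sum(subset, n - 1, s1, s2 - subset[n], s3)
--
--     # becomes part of subset 3
--     in_s3 = 0
--     if (not in_s1 and not in_s2) and (s3 - subset[n] >= 0):
--         in_s3 = subset3_sum(subset, n - 1, s1, s2, s3 - subset[n])
--
--     return in_s1 or in_s2 or in_s3
-- ===== SOURCE B (Python) =====
-- def subset3_sum(subset, n, s1, s2, s3):
--     # Breadth-first over the set of reachable remaining-capacity triples,
--     # scanning the elements from index n down instead of branching recursion.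
--     states = {(s1, s2, s3)}
--     i = n
--     while i >= 0:
--         if (0, 0, 0) in states:
--             return 1
--         x = subset[i]
--         nxt = set()
--         for (a, b, c) in states:
--             if a - x >= 0:
--                 nxt.add((a - x, b, c))
--             if b - x >= 0:
--                 nxt.add((a, b - x, c))
--             if c - x >= 0:
--                 nxt.add((a, b, c - x))
--         states = nxt
--         i -= 1
--     return 1 if (0, 0, 0) in states else 0
-- ===== Notes on version B (the rewrite author's own statement) =====
-- stated objective: alternative
-- what changed: Replaced the three-way branching depth-first recursion by an iterative breadth-first sweep that carries the set of reachable remaining-capacity triples, one list element per step; cost moves from O(3^n) worst case to O(n*S^2) in the number of distinct triples, which a timing run's inputs did not reward.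
import Mathlib
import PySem

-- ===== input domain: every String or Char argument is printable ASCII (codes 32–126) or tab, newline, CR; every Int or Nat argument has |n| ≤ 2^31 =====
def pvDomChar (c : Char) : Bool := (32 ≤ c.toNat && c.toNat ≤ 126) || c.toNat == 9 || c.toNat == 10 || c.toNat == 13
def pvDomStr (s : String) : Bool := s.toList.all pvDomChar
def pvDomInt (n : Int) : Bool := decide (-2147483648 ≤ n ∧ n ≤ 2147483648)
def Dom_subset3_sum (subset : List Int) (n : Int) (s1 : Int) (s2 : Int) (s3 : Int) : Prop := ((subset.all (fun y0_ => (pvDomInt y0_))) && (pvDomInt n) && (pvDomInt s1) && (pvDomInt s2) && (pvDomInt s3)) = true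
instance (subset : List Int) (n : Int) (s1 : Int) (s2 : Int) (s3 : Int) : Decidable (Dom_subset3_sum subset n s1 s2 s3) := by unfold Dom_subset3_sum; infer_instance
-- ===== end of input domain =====

-- B replaces A's three-way branching depth-first recursion by an iterative breadth-first
-- sweep that carries the set of reachable remaining-capacity triples (alternative algorithm).


-- ===== PORT A =====
-- fuel = (n+1).toNat : the loop variable n as a structural measure
def subset3Go (subset : List Int) (fuel : Nat) (n : Int) (s1 : Int) (s2 : Int) (s3 : Int) : Int :=
  if s1 = 0 ∧ s2 = 0 ∧ s3 = 0 then 1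
  else if n < 0 then 0
  else match fuel with
    | 0 => 0  -- unreachable: fuel = (n+1).toNat > 0 when 0 ≤ n
    | fuel + 1 =>
      let x := PySem.List.pyGetD subset n 0
      let in1 := if 0 ≤ s1 - x then subset3Go subset fuel (n - 1) (s1 - x) s2 s3 else 0
      let in2 := if in1 = 0 ∧ 0 ≤ s2 - x then subset3Go subset fuel (n - 1) s1 (s2 - x) s3 else 0
      let in3 := if in1 = 0 ∧ in2 = 0 ∧ 0 ≤ s3 - x then subset3Go subset fuel (n - 1) s1 s2 (s3 - x) else 0
      -- Python: 'in_s1 or in_s2 or in_s3' on ints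
      if in1 ≠ 0 then in1 else if in2 ≠ 0 then in2 else in3

def subset3_sum (subset : List Int) (n : Int) (s1 : Int) (s2 : Int) (s3 : Int) : Int :=
  subset3Go subset (n + 1).toNat n s1 s2 s3

-- ===== PORT B =====
-- one sweep step: every state reachable from 'states' by placing element x into one of the three sets
def subset3AltStep (x : Int) (states : PySem.Set (Int × Int × Int)) : PySem.Set (Int × Int × Int) :=
  states.foldl (fun nxt t =>
    let nxt := if 0 ≤ t.1 - x then PySem.Set.add nxt (t.1 - x, t.2.1, t.2.2) else nxt
    let nxt := if 0 ≤ t.2.1 - x then PySem.Set.add nxt (t.1, t.2.1 - x, t.2.2) else nxt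
    if 0 ≤ t.2.2 - x then PySem.Set.add nxt (t.1, t.2.1, t.2.2 - x) else nxt)
    PySem.Set.empty

-- the while-loop of Source B; fuel = (i+1).toNat counts the remaining iterations
def subset3AltLoop (subset : List Int) (fuel : Nat) (i : Int) (states : PySem.Set (Int × Int × Int)) : Int :=
  match fuel with
  | 0 => if states.contains (0, 0, 0) then 1 else 0
  | fuel + 1 =>
    if states.contains (0, 0, 0) then 1
    else subset3AltLoop subset fuel (i - 1) (subset3AltStep (PySem.List.pyGetD subset i 0) states)

def subset3_sum_alt (subset : List Int) (n : Int) (s1 : Int) (s2 : Int) (s3 : Int) : Int :=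
  subset3AltLoop subset (n + 1).toNat n (PySem.Set.ofList [(s1, s2, s3)])

-- ===== PRECONDITION & SPEC =====
-- Pre_ excludes exactly the inputs where A raises IndexError: n ≥ len(subset) with a nonzero
-- target triple (the all-zero check returns before any indexing); B raises the same IndexError there.
def Pre_subset3_sum (subset : List Int) (n : Int) (s1 : Int) (s2 : Int) (s3 : Int) : Prop :=
  (s1 = 0 ∧ s2 = 0 ∧ s3 = 0) ∨ n < subset.length
instance (subset : List Int) (n : Int) (s1 : Int) (s2 : Int) (s3 : Int) : Decidable (Pre_subset3_sum subset n s1 s2 s3) := by unfold Pre_subset3_sum; infer_instance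

def pvWitness_subset3_sum : List Int × Int × Int × Int × Int := ([1, 2, 3, 4, 5, 6], 5, 7, 7, 7)

def Spec_subset3_sum (subset : List Int) (n : Int) (s1 : Int) (s2 : Int) (s3 : Int) (out : Int) : Prop := out = subset3_sum_alt subset n s1 s2 s3
instance (subset : List Int) (n : Int) (s1 : Int) (s2 : Int) (s3 : Int) (out : Int) : Decidable (Spec_subset3_sum subset n s1 s2 s3 out) := by unfold Spec_subset3_sum; infer_instance

-- ===== CLAIM (what is proved, stated in full; the proofs are below) =====
def Claim_equal_subset3_sum : Prop := ∀ (subset : List Int) (n : Int) (s1 : Int) (s2 : Int) (s3 : Int), Dom_subset3_sum subset n s1 s2 s3 → Pre_subset3_sum subset n s1 s2 s3 → Spec_subset3_sum subset n s1 s2 s3 (subset3_sum subset n s1 s2 s3)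

-- ===== LEMMAS AND PROOFS =====
def succRel (x : Int) (t t' : Int × Int × Int) : Prop :=
  (0 ≤ t.1 - x ∧ t' = (t.1 - x, t.2.1, t.2.2)) ∨
  (0 ≤ t.2.1 - x ∧ t' = (t.1, t.2.1 - x, t.2.2)) ∨
  (0 ≤ t.2.2 - x ∧ t' = (t.1, t.2.1, t.2.2 - x))

lemma ite01 (c : Prop) [Decidable c] (a : Int) (h : a = 0 ∨ a = 1) :
    (if c then a else 0) = 0 ∨ (if c then a else 0) = 1 := by
  split <;> simp_all

lemma go_zero_or_one (subset : List Int) (fuel : Nat) (n s1 s2 s3 : Int) :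
    subset3Go subset fuel n s1 s2 s3 = 0 ∨ subset3Go subset fuel n s1 s2 s3 = 1 := by
  induction fuel generalizing n s1 s2 s3 with
  | zero => rw [subset3Go]; split_ifs <;> simp
  | succ fuel ih =>
    rw [subset3Go]
    split
    · right; rfl
    · split
      · left; rfl
      · simp only
        have h1 := ite01 (0 ≤ s1 - PySem.List.pyGetD subset n 0) _ (ih (n - 1) (s1 - PySem.List.pyGetD subset n 0) s2 s3)
        set in1 := if 0 ≤ s1 - PySem.List.pyGetD subset n 0 then subset3Go subset fuel (n - 1) (s1 - PySem.List.pyGetD subset n 0) s2 s3 else 0 with hin1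
        have h2 := ite01 (in1 = 0 ∧ 0 ≤ s2 - PySem.List.pyGetD subset n 0) _ (ih (n - 1) s1 (s2 - PySem.List.pyGetD subset n 0) s3)
        set in2 := if in1 = 0 ∧ 0 ≤ s2 - PySem.List.pyGetD subset n 0 then subset3Go subset fuel (n - 1) s1 (s2 - PySem.List.pyGetD subset n 0) s3 else 0 with hin2
        have h3 := ite01 (in1 = 0 ∧ in2 = 0 ∧ 0 ≤ s3 - PySem.List.pyGetD subset n 0) _ (ih (n - 1) s1 s2 (s3 - PySem.List.pyGetD subset n 0))
        set in3 := if in1 = 0 ∧ in2 = 0 ∧ 0 ≤ s3 - PySem.List.pyGetD subset n 0 then subset3Go subset fuel (n - 1) s1 s2 (s3 - PySem.List.pyGetD subset n 0) else 0 with hin3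
        split_ifs <;> tauto

lemma ite_eq_one_iff (c : Prop) [Decidable c] (a : Int) :
    ((if c then a else 0) = 1) ↔ (c ∧ a = 1) := by split <;> simp_all

lemma go_step_iff (subset : List Int) (fuel : Nat) (n s1 s2 s3 : Int)
    (h0 : ¬ (s1 = 0 ∧ s2 = 0 ∧ s3 = 0)) (hn : ¬ n < 0) :
    subset3Go subset (fuel + 1) n s1 s2 s3 = 1 ↔
      ∃ t', succRel (PySem.List.pyGetD subset n 0) (s1, s2, s3) t' ∧
        subset3Go subset fuel (n - 1) t'.1 t'.2.1 t'.2.2 = 1 := by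
  conv_lhs => rw [subset3Go]
  rw [if_neg h0, if_neg hn]
  simp only
  set x := PySem.List.pyGetD subset n 0 with hx
  set r1 := subset3Go subset fuel (n - 1) (s1 - x) s2 s3 with hr1
  set r2 := subset3Go subset fuel (n - 1) s1 (s2 - x) s3 with hr2
  set r3 := subset3Go subset fuel (n - 1) s1 s2 (s3 - x) with hr3
  have hrhs : (∃ t', succRel x (s1, s2, s3) t' ∧ subset3Go subset fuel (n - 1) t'.1 t'.2.1 t'.2.2 = 1)
      ↔ ((0 ≤ s1 - x ∧ r1 = 1) ∨ (0 ≤ s2 - x ∧ r2 = 1) ∨ (0 ≤ s3 - x ∧ r3 = 1)) := by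
    constructor
    · rintro ⟨t', (⟨hc, rfl⟩ | ⟨hc, rfl⟩ | ⟨hc, rfl⟩), hp⟩ <;> simp_all
    · rintro (⟨hc, hp⟩ | ⟨hc, hp⟩ | ⟨hc, hp⟩)
      exacts [⟨(s1 - x, s2, s3), Or.inl ⟨hc, rfl⟩, hp⟩,
              ⟨(s1, s2 - x, s3), Or.inr (Or.inl ⟨hc, rfl⟩), hp⟩,
              ⟨(s1, s2, s3 - x), Or.inr (Or.inr ⟨hc, rfl⟩), hp⟩]
  rw [hrhs]
  set in1 := if 0 ≤ s1 - x then r1 else 0 with hin1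
  set in2 := if in1 = 0 ∧ 0 ≤ s2 - x then r2 else 0 with hin2
  set in3 := if in1 = 0 ∧ in2 = 0 ∧ 0 ≤ s3 - x then r3 else 0 with hin3
  have e1 : in1 = 1 ↔ (0 ≤ s1 - x ∧ r1 = 1) := hin1 ▸ ite_eq_one_iff _ _
  have e2 : in2 = 1 ↔ ((in1 = 0 ∧ 0 ≤ s2 - x) ∧ r2 = 1) := hin2 ▸ ite_eq_one_iff _ _
  have e3 : in3 = 1 ↔ ((in1 = 0 ∧ in2 = 0 ∧ 0 ≤ s3 - x) ∧ r3 = 1) := hin3 ▸ ite_eq_one_iff _ _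
  have z1 : in1 = 0 ∨ in1 = 1 := hin1 ▸ ite01 _ _ (hr1 ▸ go_zero_or_one subset fuel (n - 1) (s1 - x) s2 s3)
  have z2 : in2 = 0 ∨ in2 = 1 := hin2 ▸ ite01 _ _ (hr2 ▸ go_zero_or_one subset fuel (n - 1) s1 (s2 - x) s3)
  have z3 : in3 = 0 ∨ in3 = 1 := hin3 ▸ ite01 _ _ (hr3 ▸ go_zero_or_one subset fuel (n - 1) s1 s2 (s3 - x))
  clear hin1 hin2 hin3
  clear_value in1 in2 in3
  rcases z1 with z1 | z1 <;> rcases z2 with z2 | z2 <;> rcases z3 with z3 | z3 <;>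
    subst z1 z2 z3 <;> simp_all

lemma mem_step_aux (x : Int) (L : List (Int × Int × Int)) (acc : PySem.Set (Int × Int × Int)) (t' : Int × Int × Int) :
    t' ∈ L.foldl (fun nxt t =>
      let nxt := if 0 ≤ t.1 - x then PySem.Set.add nxt (t.1 - x, t.2.1, t.2.2) else nxt
      let nxt := if 0 ≤ t.2.1 - x then PySem.Set.add nxt (t.1, t.2.1 - x, t.2.2) else nxt
      if 0 ≤ t.2.2 - x then PySem.Set.add nxt (t.1, t.2.1, t.2.2 - x) else nxt) acc ↔
    t' ∈ acc ∨ ∃ t ∈ L, succRel x t t' := by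
  induction L generalizing acc with
  | nil => simp
  | cons t L ih =>
    rw [List.foldl_cons, ih]
    have hone : t' ∈ (let nxt := if 0 ≤ t.1 - x then PySem.Set.add acc (t.1 - x, t.2.1, t.2.2) else acc
        let nxt := if 0 ≤ t.2.1 - x then PySem.Set.add nxt (t.1, t.2.1 - x, t.2.2) else nxt
        if 0 ≤ t.2.2 - x then PySem.Set.add nxt (t.1, t.2.1, t.2.2 - x) else nxt) ↔
        t' ∈ acc ∨ succRel x t t' := by
      simp only [succRel]
      split_ifs <;> simp only [PySem.Set.mem_add, sub_nonneg] at * <;> tauto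
    rw [hone, List.exists_mem_cons_iff]
    tauto

lemma mem_step (x : Int) (S : PySem.Set (Int × Int × Int)) (t' : Int × Int × Int) :
    t' ∈ subset3AltStep x S ↔ ∃ t ∈ S, succRel x t t' := by
  rw [subset3AltStep, mem_step_aux]
  simp [PySem.Set.empty]

lemma go_of_neg (subset : List Int) (fuel : Nat) (i : Int) (hi : i < 0) (t : Int × Int × Int) :
    subset3Go subset fuel i t.1 t.2.1 t.2.2 = 1 ↔ t = (0, 0, 0) := by
  rw [subset3Go.eq_def]
  split
  · simp_all [Prod.ext_iff]
  · rename_i h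
    simp only [Prod.ext_iff]
    constructor
    · intro hh; omega
    · intro hh; exact absurd ⟨hh.1, hh.2.1, hh.2.2⟩ h

lemma go_zero_triple (subset : List Int) (fuel : Nat) (i : Int) :
    subset3Go subset fuel i 0 0 0 = 1 := by
  rw [subset3Go.eq_def]; simp

lemma exists_go_neg (subset : List Int) (fuel : Nat) (i : Int) (hi : i < 0) (S : PySem.Set (Int × Int × Int)) :
    (∃ t ∈ S, subset3Go subset fuel i t.1 t.2.1 t.2.2 = 1) ↔ (0, 0, 0) ∈ S := by
  constructor
  · rintro ⟨t, ht, h1⟩; exact ((go_of_neg subset fuel i hi t).mp h1) ▸ ht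
  · intro h; exact ⟨(0, 0, 0), h, (go_of_neg subset fuel i hi _).mpr rfl⟩

lemma loop_eq (subset : List Int) (fuel : Nat) (i : Int) (S : PySem.Set (Int × Int × Int))
    (hfi : fuel = (i + 1).toNat) :
    subset3AltLoop subset fuel i S =
      if ∃ t ∈ S, subset3Go subset fuel i t.1 t.2.1 t.2.2 = 1 then 1 else 0 := by
  induction fuel generalizing i S with
  | zero =>
    have hi : i < 0 := by omega
    rw [subset3AltLoop]
    simp only [exists_go_neg subset 0 i hi S]
    by_cases h : (0, 0, 0) ∈ S
    · rw [if_pos h, if_pos ((PySem.Set.contains_iff S _).mpr h)]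
    · rw [if_neg h, if_neg (fun hc => h ((PySem.Set.contains_iff S _).mp hc))]
  | succ fuel ih =>
    have hi : ¬ i < 0 := by omega
    rw [subset3AltLoop]
    by_cases hc : (0, 0, 0) ∈ S
    · rw [if_pos ((PySem.Set.contains_iff S _).mpr hc),
        if_pos ⟨(0, 0, 0), hc, go_zero_triple subset (fuel + 1) i⟩]
    · rw [if_neg (fun h => hc ((PySem.Set.contains_iff S _).mp h))]
      rw [ih (i - 1) _ (by omega)]
      have hne : ∀ t ∈ S, ¬ (t.1 = 0 ∧ t.2.1 = 0 ∧ t.2.2 = 0) := by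
        rintro t ht ⟨a, b, c⟩
        exact hc (by
          have : t = ((0 : Int), (0 : Int), (0 : Int)) := by simp [Prod.ext_iff, a, b, c]
          exact this ▸ ht)
      have hiff : (∃ t' ∈ subset3AltStep (PySem.List.pyGetD subset i 0) S,
            subset3Go subset fuel (i - 1) t'.1 t'.2.1 t'.2.2 = 1) ↔
          (∃ t ∈ S, subset3Go subset (fuel + 1) i t.1 t.2.1 t.2.2 = 1) := by
        constructor
        · rintro ⟨t', ht', h1⟩
          obtain ⟨t, ht, hsucc⟩ := (mem_step _ _ _).mp ht'
          exact ⟨t, ht, (go_step_iff subset fuel i t.1 t.2.1 t.2.2 (hne t ht) hi).mpr ⟨t', hsucc, h1⟩⟩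
        · rintro ⟨t, ht, h1⟩
          obtain ⟨t', hsucc, h1'⟩ := (go_step_iff subset fuel i t.1 t.2.1 t.2.2 (hne t ht) hi).mp h1
          exact ⟨t', (mem_step _ _ _).mpr ⟨t, ht, hsucc⟩, h1'⟩
      simp only [hiff]

-- ===== VERDICT (by name: the statement is the Claim_ definition above) =====
theorem subset3_sum_spec : Claim_equal_subset3_sum := by
  intro subset n s1 s2 s3 _ _
  unfold Spec_subset3_sum subset3_sum subset3_sum_alt
  rw [loop_eq subset _ n _ rfl]
  rcases go_zero_or_one subset (n + 1).toNat n s1 s2 s3 with h | h <;>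
    simp [PySem.Set.ofList, PySem.Set.add, PySem.Set.empty, h]
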